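-- pv_equiv track=rewrite | github.com/palldas/Project-2-Search-CSC-480 | PokerBot.py | get_straight_highest_card
-- ===== SOURCE A (Python) =====
-- def get_straight_highest_card(ranks): # highest card in straight, or -1 if no straight
--     rank_set = set(ranks)
--
--     for high in range(12, 3, -1): #lowest straight would start at 4
--         straight_found = True
--
--         for i in range(5):
--             expected_card = (high - i) % 13
--             if expected_card not in rank_set:
--                 straight_found = False
--                 break
--         if straight_found:
--             return high
--
--     if {12, 0, 1, 2, 3}.issubset(rank_set): #edge case for 5432A
--         return 3
--
--     return -1 #no straight found
-- ===== SOURCE B (Python) =====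
-- def get_straight_highest_card(ranks):  # bitmask straight detection: one pass + bit-parallel window
--     mask = 0
--     for r in ranks:
--         if 0 <= r < 13:
--             mask |= 1 << r
--     # shift every rank up by one bit; bit 0 is the ace-low sentinel (ace = rank 12)
--     m = (mask << 1) | ((mask >> 12) & 1)
--     window = m & (m >> 1) & (m >> 2) & (m >> 3) & (m >> 4)
--     if window == 0:
--         return -1
--     return window.bit_length() + 2  # highest set bit index + 3
-- ===== Notes on version B (the rewrite author's own statement) =====
-- stated objective: alternative
-- what changed: Replaces the nested high/offset set-membership loops with a single pass building a 13-bit rank bitmask followed by bit-parallel straight detection (m & m>>1 & ... & m>>4 with an ace-low sentinel bit), returning highest-set-bit index + 3.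
import Mathlib
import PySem

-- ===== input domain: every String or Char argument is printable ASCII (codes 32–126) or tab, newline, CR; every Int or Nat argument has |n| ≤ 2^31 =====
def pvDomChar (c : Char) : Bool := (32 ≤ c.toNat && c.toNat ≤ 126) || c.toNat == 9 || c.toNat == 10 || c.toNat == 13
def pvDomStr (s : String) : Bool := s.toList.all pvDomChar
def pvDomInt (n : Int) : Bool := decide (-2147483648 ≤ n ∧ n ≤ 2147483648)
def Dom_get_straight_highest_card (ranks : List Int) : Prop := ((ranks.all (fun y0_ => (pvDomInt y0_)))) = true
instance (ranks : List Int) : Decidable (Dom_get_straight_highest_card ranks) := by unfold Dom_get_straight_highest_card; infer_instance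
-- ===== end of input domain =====

-- B replaces A's nested membership loops by a one-pass 13-bit mask plus bit-parallel straight detection (alternative algorithm, same cost class).

-- ===== PORT A =====
-- inner 'for i in range(5)' with break: straight_found stays true unless a card is missing
def pvInnerA (s : PySem.Set Int) (high : Int) : List Int → Bool
  | [] => true
  | i :: rest =>
    let expected_card := PySem.Int.mod (high - i) 13
    if ¬ (PySem.Set.contains s expected_card) then false
    else pvInnerA s high rest

-- outer 'for high in range(12, 3, -1)' with early return; after the loop the 5432A check
def pvOuterA (s : PySem.Set Int) : List Int → Int
  | [] =>
    if PySem.Set.issubset (PySem.Set.ofList [12, 0, 1, 2, 3]) s then 3 else -1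
  | high :: rest =>
    if pvInnerA s high (PySem.List.pyRange 0 5 1) then high else pvOuterA s rest

def get_straight_highest_card (ranks : List Int) : Int :=
  let rank_set : PySem.Set Int := PySem.Set.ofList ranks
  pvOuterA rank_set (PySem.List.pyRange 12 3 (-1))

-- ===== PORT B =====
-- one pass: bit r set iff rank r (0 ≤ r < 13) occurs
def pvMaskStep (m : Nat) (r : Int) : Nat :=
  if 0 ≤ r ∧ r < 13 then m ||| (1 <<< r.toNat) else m

-- from the mask: shifted mask with ace-low sentinel, 5-wide window AND, highest bit + 3
def pvFromMask (mask : Nat) : Int :=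
  let m := (mask <<< 1) ||| ((mask >>> 12) &&& 1)
  let window := m &&& (m >>> 1) &&& (m >>> 2) &&& (m >>> 3) &&& (m >>> 4)
  if window = 0 then -1 else ((window.log2 : Int) + 1) + 2  -- bit_length() + 2

def get_straight_highest_card_alt (ranks : List Int) : Int :=
  pvFromMask (ranks.foldl pvMaskStep 0)

-- ===== PRECONDITION & SPEC =====
def Spec_get_straight_highest_card (ranks : List Int) (out : Int) : Prop := out = get_straight_highest_card_alt ranks
instance (ranks : List Int) (out : Int) : Decidable (Spec_get_straight_highest_card ranks out) := by unfold Spec_get_straight_highest_card; infer_instance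

-- ===== CLAIM (what is proved, stated in full; the proofs are below) =====
def Claim_equal_get_straight_highest_card : Prop := ∀ (ranks : List Int), Dom_get_straight_highest_card ranks → Spec_get_straight_highest_card ranks (get_straight_highest_card ranks)

-- ===== LEMMAS AND PROOFS =====

-- A's result seen purely through the 13 membership bits
def pvAspec (b0 b1 b2 b3 b4 b5 b6 b7 b8 b9 b10 b11 b12 : Bool) : Int :=
  if b12 && b11 && b10 && b9 && b8 then 12
  else if b11 && b10 && b9 && b8 && b7 then 11
  else if b10 && b9 && b8 && b7 && b6 then 10
  else if b9 && b8 && b7 && b6 && b5 then 9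
  else if b8 && b7 && b6 && b5 && b4 then 8
  else if b7 && b6 && b5 && b4 && b3 then 7
  else if b6 && b5 && b4 && b3 && b2 then 6
  else if b5 && b4 && b3 && b2 && b1 then 5
  else if b4 && b3 && b2 && b1 && b0 then 4
  else if b12 && b0 && b1 && b2 && b3 then 3
  else -1

theorem pv_mask_testBit (ranks : List Int) (j : Nat) (hj : j < 13) (m : Nat) :
    (ranks.foldl pvMaskStep m).testBit j = (m.testBit j || decide ((j : Int) ∈ ranks)) := by
  induction ranks generalizing m with
  | nil => simp
  | cons r rest ih =>
    simp only [List.foldl_cons, ih, List.mem_cons]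
    unfold pvMaskStep
    split_ifs with h
    · rcases h with ⟨h0, h13⟩
      rw [Nat.testBit_or, Nat.one_shiftLeft, Nat.testBit_two_pow]
      by_cases he : (j : Int) = r
      · have : r.toNat = j := by omega
        simp [this, he]
      · have : r.toNat ≠ j := by omega
        simp [this, he]
    · have he : (j : Int) ≠ r := by omega
      simp [he]

theorem pvA_eq (ranks : List Int) :
    get_straight_highest_card ranks =
      pvAspec (decide ((0:Int) ∈ ranks)) (decide ((1:Int) ∈ ranks)) (decide ((2:Int) ∈ ranks))
        (decide ((3:Int) ∈ ranks)) (decide ((4:Int) ∈ ranks)) (decide ((5:Int) ∈ ranks))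
        (decide ((6:Int) ∈ ranks)) (decide ((7:Int) ∈ ranks)) (decide ((8:Int) ∈ ranks))
        (decide ((9:Int) ∈ ranks)) (decide ((10:Int) ∈ ranks)) (decide ((11:Int) ∈ ranks))
        (decide ((12:Int) ∈ ranks)) := by
  have hr1 : PySem.List.pyRange 12 3 (-1) = [12, 11, 10, 9, 8, 7, 6, 5, 4] := by decide
  have hr2 : PySem.List.pyRange 0 5 1 = [0, 1, 2, 3, 4] := by decide
  simp only [get_straight_highest_card, hr1, hr2, pvOuterA, pvInnerA, pvAspec]
  norm_num [PySem.Int.mod, PySem.Set.contains_eq_decide, PySem.Set.mem_ofList,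
    PySem.Set.issubset_iff, and_assoc,
    (by decide : Int.fmod 1 13 = 1), (by decide : Int.fmod 2 13 = 2),
    (by decide : Int.fmod 3 13 = 3), (by decide : Int.fmod 4 13 = 4),
    (by decide : Int.fmod 5 13 = 5), (by decide : Int.fmod 6 13 = 6),
    (by decide : Int.fmod 7 13 = 7), (by decide : Int.fmod 8 13 = 8),
    (by decide : Int.fmod 9 13 = 9), (by decide : Int.fmod 10 13 = 10),
    (by decide : Int.fmod 11 13 = 11), (by decide : Int.fmod 12 13 = 12)]

theorem pv_mask_lt (ranks : List Int) (m : Nat) (hm : m < 8192) :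
    ranks.foldl pvMaskStep m < 8192 := by
  induction ranks generalizing m with
  | nil => exact hm
  | cons r rest ih =>
    refine ih _ ?_
    unfold pvMaskStep
    split_ifs with h
    · have h1 : (1 <<< r.toNat) < 8192 := by
        rw [Nat.one_shiftLeft]
        calc 2 ^ r.toNat < 2 ^ 13 := by
              exact Nat.pow_lt_pow_right (by norm_num) (by omega)
          _ = 8192 := by norm_num
      exact Nat.or_lt_two_pow (n := 13) hm h1
    · exact hm

set_option maxRecDepth 4096 in
set_option maxHeartbeats 4000000 in
theorem pvP_chunk : ∀ hi < 128, ∀ lo < 64,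
    pvFromMask (64 * hi + lo) =
      pvAspec ((64 * hi + lo).testBit 0) ((64 * hi + lo).testBit 1) ((64 * hi + lo).testBit 2)
        ((64 * hi + lo).testBit 3) ((64 * hi + lo).testBit 4) ((64 * hi + lo).testBit 5)
        ((64 * hi + lo).testBit 6) ((64 * hi + lo).testBit 7) ((64 * hi + lo).testBit 8)
        ((64 * hi + lo).testBit 9) ((64 * hi + lo).testBit 10) ((64 * hi + lo).testBit 11)
        ((64 * hi + lo).testBit 12) := by decide

theorem pv_fromMask_eq (mask : Nat) (h : mask < 8192) :
    pvFromMask mask =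
      pvAspec (mask.testBit 0) (mask.testBit 1) (mask.testBit 2) (mask.testBit 3)
        (mask.testBit 4) (mask.testBit 5) (mask.testBit 6) (mask.testBit 7) (mask.testBit 8)
        (mask.testBit 9) (mask.testBit 10) (mask.testBit 11) (mask.testBit 12) := by
  have := pvP_chunk (mask / 64) (by omega) (mask % 64) (by omega)
  rwa [show 64 * (mask / 64) + mask % 64 = mask by omega] at this

-- ===== VERDICT (by name: the statement is the Claim_ definition above) =====
theorem get_straight_highest_card_spec : Claim_equal_get_straight_highest_card := by
  intro ranks _
  unfold Spec_get_straight_highest_card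
  rw [pvA_eq, get_straight_highest_card_alt,
    pv_fromMask_eq _ (pv_mask_lt ranks 0 (by norm_num))]
  congr 1 <;> · rw [pv_mask_testBit _ _ (by norm_num)]; simp
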